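-- pv_equiv track=rewrite | github.com/g4mm4p4nd4/op-observe | agentic_radar/detectors/vulnerabilities.py | _pick_more_severe
-- ===== SOURCE A (Python) =====
-- from typing import Any, Dict, Iterable, List, Optional, Sequence, Tuple
--
-- SEVERITY_ORDER = {"critical": 4, "high": 3, "medium": 2, "moderate": 2, "low": 1}
--
-- def _pick_more_severe(left: Optional[str], right: Optional[str]) -> Optional[str]:
--     candidates = [(left or "").lower(), (right or "").lower()]
--     best_level = 0
--     best_value: Optional[str] = None
--     fallback: Optional[str] = None
--     for candidate in candidates:
--         level = SEVERITY_ORDER.get(candidate, 0)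
--         if candidate and fallback is None:
--             fallback = candidate.upper()
--         if level > best_level and candidate:
--             best_level = level
--             best_value = candidate.upper()
--     return best_value or fallback
-- ===== SOURCE B (Python) =====
-- SEVERITY_ORDER = {"critical": 4, "high": 3, "medium": 2, "moderate": 2, "low": 1}
--
-- def _pick_more_severe(left, right):
--     l = (left or "").lower()
--     r = (right or "").lower()
--     for lvl in (4, 3, 2, 1):
--         if SEVERITY_ORDER.get(l) == lvl:
--             return l.upper()
--         if SEVERITY_ORDER.get(r) == lvl:
--             return r.upper()
--     if l:
--         return l.upper()
--     if r:
--         return r.upper()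
--     return None
-- ===== Notes on version B (the rewrite author's own statement) =====
-- stated objective: alternative
-- what changed: Instead of A's single accumulator loop over the two candidates tracking best_level/best_value/fallback, B iterates over the severity LEVELS in descending order (4,3,2,1) and returns the first candidate (left checked first) whose level matches, with a separate trivial first-non-empty fallback.
import Mathlib
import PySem

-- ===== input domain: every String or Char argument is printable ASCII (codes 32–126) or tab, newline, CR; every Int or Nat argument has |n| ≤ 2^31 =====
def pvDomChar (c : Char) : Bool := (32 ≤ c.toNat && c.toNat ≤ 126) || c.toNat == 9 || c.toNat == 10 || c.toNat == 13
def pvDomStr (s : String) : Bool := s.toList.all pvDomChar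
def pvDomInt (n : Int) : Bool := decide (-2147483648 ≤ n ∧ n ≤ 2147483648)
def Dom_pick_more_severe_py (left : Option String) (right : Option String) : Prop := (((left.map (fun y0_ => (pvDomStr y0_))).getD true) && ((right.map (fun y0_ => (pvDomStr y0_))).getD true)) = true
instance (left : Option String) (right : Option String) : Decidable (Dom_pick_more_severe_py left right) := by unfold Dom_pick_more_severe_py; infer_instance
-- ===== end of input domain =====

-- B replaces A's accumulator loop over the two candidates by a descending scan over the
-- severity levels, returning the first candidate found at a level (objective: alternative).

-- ===== PORT A =====
def sevOrder : PySem.Dict String Int :=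
  PySem.Dict.ofList [("critical", 4), ("high", 3), ("medium", 2), ("moderate", 2), ("low", 1)]

-- A's loop over 'candidates' and final 'best_value or fallback', with the two
-- (already lowered) candidates as arguments.
def aCore (d1 d2 : String) : Option String :=
  let candidates := [d1, d2]
  let st := candidates.foldl
    (fun (st : Int × Option String × Option String) candidate =>
      let best_level := st.1
      let best_value := st.2.1
      let fallback := st.2.2
      let level := PySem.Dict.getD sevOrder candidate 0
      let fallback := if candidate ≠ "" ∧ fallback = none then some (PySem.Str.upper candidate) else fallback
      if level > best_level ∧ candidate ≠ "" then (level, some (PySem.Str.upper candidate), fallback)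
      else (best_level, best_value, fallback))
    ((0 : Int), (none : Option String), (none : Option String))
  -- 'best_value or fallback': best_value is falsy iff it is None or ""
  match st.2.1 with
  | some v => if v = "" then st.2.2 else some v
  | none => st.2.2

def pick_more_severe_py (left : Option String) (right : Option String) : Option String :=
  aCore (PySem.Str.lower (left.getD "")) (PySem.Str.lower (right.getD ""))

-- ===== PORT B =====
-- B's 'for lvl in (4,3,2,1)' loop with early returns, then the fallback checks.
def bLoop (l r : String) : List Int → Option String
  | [] =>
      if l ≠ "" then some (PySem.Str.upper l)
      else if r ≠ "" then some (PySem.Str.upper r)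
      else none
  | lvl :: rest =>
      if PySem.Dict.get? sevOrder l = some lvl then some (PySem.Str.upper l)
      else if PySem.Dict.get? sevOrder r = some lvl then some (PySem.Str.upper r)
      else bLoop l r rest

def pick_more_severe_py_alt (left : Option String) (right : Option String) : Option String :=
  bLoop (PySem.Str.lower (left.getD "")) (PySem.Str.lower (right.getD "")) [4, 3, 2, 1]

-- ===== PRECONDITION & SPEC =====
def Spec_pick_more_severe_py (left : Option String) (right : Option String) (out : Option String) : Prop := out = pick_more_severe_py_alt left right
instance (left : Option String) (right : Option String) (out : Option String) : Decidable (Spec_pick_more_severe_py left right out) := by unfold Spec_pick_more_severe_py; infer_instance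

-- ===== CLAIM (what is proved, stated in full; the proofs are below) =====
def Claim_equal_pick_more_severe_py : Prop := ∀ (left : Option String) (right : Option String), Dom_pick_more_severe_py left right → Spec_pick_more_severe_py left right (pick_more_severe_py left right)

-- ===== LEMMAS AND PROOFS =====

lemma sev_mk : sevOrder = PySem.Dict.mk [("critical", (4 : Int)), ("high", 3), ("medium", 2), ("moderate", 2), ("low", 1)] := by
  decide

lemma classify (c : String) :
    c = "critical" ∨ c = "high" ∨ c = "medium" ∨ c = "moderate" ∨ c = "low" ∨
    PySem.Dict.get? sevOrder c = none := by
  by_cases h1 : c = "critical"; · exact Or.inl h1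
  by_cases h2 : c = "high"; · exact Or.inr (Or.inl h2)
  by_cases h3 : c = "medium"; · exact Or.inr (Or.inr (Or.inl h3))
  by_cases h4 : c = "moderate"; · exact Or.inr (Or.inr (Or.inr (Or.inl h4)))
  by_cases h5 : c = "low"; · exact Or.inr (Or.inr (Or.inr (Or.inr (Or.inl h5))))
  refine Or.inr (Or.inr (Or.inr (Or.inr (Or.inr ?_))))
  rw [sev_mk]
  simp [PySem.Dict.get?_mk_cons, Ne.symm h1, Ne.symm h2, Ne.symm h3, Ne.symm h4, Ne.symm h5,
    PySem.Dict.get?]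

lemma getD_of_none {c : String} (h : PySem.Dict.get? sevOrder c = none) :
    PySem.Dict.getD sevOrder c 0 = 0 := by
  rw [PySem.Dict.getD_eq_get?_getD, h]; rfl

lemma sevG1 : sevOrder.get? "critical" = some 4 := by decide
lemma sevG2 : sevOrder.get? "high" = some 3 := by decide
lemma sevG3 : sevOrder.get? "medium" = some 2 := by decide
lemma sevG4 : sevOrder.get? "moderate" = some 2 := by decide
lemma sevG5 : sevOrder.get? "low" = some 1 := by decide
lemma sevG0 : sevOrder.get? "" = none := by decide
lemma sevD1 : sevOrder.getD "critical" 0 = 4 := by decide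
lemma sevD2 : sevOrder.getD "high" 0 = 3 := by decide
lemma sevD3 : sevOrder.getD "medium" 0 = 2 := by decide
lemma sevD4 : sevOrder.getD "moderate" 0 = 2 := by decide
lemma sevD5 : sevOrder.getD "low" 0 = 1 := by decide

lemma upNe1 : PySem.Str.upper "critical" ≠ "" := by decide
lemma upNe2 : PySem.Str.upper "high" ≠ "" := by decide
lemma upNe3 : PySem.Str.upper "medium" ≠ "" := by decide
lemma upNe4 : PySem.Str.upper "moderate" ≠ "" := by decide
lemma upNe5 : PySem.Str.upper "low" ≠ "" := by decide

lemma core_eq (d1 d2 : String) : aCore d1 d2 = bLoop d1 d2 [4, 3, 2, 1] := by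
  rcases classify d1 with h1 | h1 | h1 | h1 | h1 | h1 <;>
    rcases classify d2 with h2 | h2 | h2 | h2 | h2 | h2 <;>
    try (subst h1; subst h2; decide)
  all_goals
    first
      | (subst h1
         by_cases he2 : d2 = "" <;>
           simp [aCore, bLoop, h2, getD_of_none h2, he2, sevG0, sevG1, sevG2, sevG3, sevG4, sevG5,
             sevD1, sevD2, sevD3, sevD4, sevD5, upNe1, upNe2, upNe3, upNe4, upNe5])
      | (subst h2
         by_cases he1 : d1 = "" <;>
           simp [aCore, bLoop, h1, getD_of_none h1, he1, sevG0, sevG1, sevG2, sevG3, sevG4, sevG5,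
             sevD1, sevD2, sevD3, sevD4, sevD5, upNe1, upNe2, upNe3, upNe4, upNe5])
      | (by_cases he1 : d1 = "" <;> by_cases he2 : d2 = "" <;>
           simp [aCore, bLoop, h1, h2, getD_of_none h1, getD_of_none h2, he1, he2,
             sevG0, sevG1, sevG2, sevG3, sevG4, sevG5, sevD1, sevD2, sevD3, sevD4, sevD5,
             upNe1, upNe2, upNe3, upNe4, upNe5])

-- ===== VERDICT (by name: the statement is the Claim_ definition above) =====
theorem pick_more_severe_py_spec : Claim_equal_pick_more_severe_py := by
  intro left right _
  unfold Spec_pick_more_severe_py pick_more_severe_py pick_more_severe_py_alt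
  exact core_eq _ _
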